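-- pv_equiv track=rewrite | github.com/Rifai-13/Pratikum_Fungsional | Modul3/demo/tugas1/aritmatikaB.py | baris_aritmetika_geometri
-- ===== SOURCE A (Python) =====
-- def baris_aritmetika_geometri(a, d, r, n, hasil=None):
--     if hasil is None:
--         hasil = []
--
--     if n == 1:
--         hasil.append(a)
--     else:
--         # Rekursif untuk menghitung suku ke-(n-1)
--         baris_aritmetika_geometri(a, d, r, n - 1, hasil)
--         # Menambahkan suku ke-n ke dalam daftar hasil
--         Un = a + (n - 1) * d * (r ** (n - 1))
--         hasil.append(Un)
--
--     return hasil
-- ===== SOURCE B (Python) =====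
-- def baris_aritmetika_geometri(a, d, r, n, hasil=None):
--     # Iterative version with a running power of r; mutates a passed-in list like A.
--     if hasil is None:
--         hasil = []
--     p = 1  # r ** (i - 1)
--     for i in range(1, n + 1):
--         hasil.append(a + (i - 1) * d * p)
--         p *= r
--     return hasil
-- ===== Notes on version B (the rewrite author's own statement) =====
-- stated objective: faster
-- what changed: Replaces A's head recursion (and fresh r**(i-1) big-power at every step) by a single iterative loop that keeps a running power of r, so no recursion depth limit and no repeated exponentiation.
import Mathlib
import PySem

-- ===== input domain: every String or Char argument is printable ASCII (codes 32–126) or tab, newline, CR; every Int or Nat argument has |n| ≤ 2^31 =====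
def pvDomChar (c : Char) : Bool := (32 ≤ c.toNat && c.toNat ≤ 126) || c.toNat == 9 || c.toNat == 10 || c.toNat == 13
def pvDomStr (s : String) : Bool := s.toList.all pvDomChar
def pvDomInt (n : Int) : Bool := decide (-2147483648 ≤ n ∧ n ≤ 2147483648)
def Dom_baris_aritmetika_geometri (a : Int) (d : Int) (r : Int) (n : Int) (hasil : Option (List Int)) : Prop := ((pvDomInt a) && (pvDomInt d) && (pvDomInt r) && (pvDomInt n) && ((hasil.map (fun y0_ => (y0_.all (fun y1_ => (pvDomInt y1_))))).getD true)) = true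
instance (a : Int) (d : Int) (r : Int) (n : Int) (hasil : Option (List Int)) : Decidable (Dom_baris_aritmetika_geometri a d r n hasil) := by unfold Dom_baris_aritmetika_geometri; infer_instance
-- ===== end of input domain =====

-- B replaces A's head recursion (with a fresh r**(i-1) each level) by one loop with a running power of r; equivalence about the return value (both mutate a passed-in list identically for n ≥ 1).

-- ===== PORT A =====
-- A recurses on n down to the base case n == 1; for n ≤ 0 the Python recurses forever
-- (RecursionError), which Pre_ excludes — the `n ≤ 0` branch is only a totality guard.
def baris_aritmetika_geometri_go (a : Int) (d : Int) (r : Int) (n : Int) (hasil : List Int) : List Int :=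
  if n = 1 then hasil ++ [a]
  else if h : n ≤ 0 then hasil   -- totality guard; Python diverges here (outside Pre_)
  else
    let hasil' := baris_aritmetika_geometri_go a d r (n - 1) hasil
    hasil' ++ [a + (n - 1) * d * r ^ (n - 1).toNat]
termination_by n.toNat
decreasing_by omega

def baris_aritmetika_geometri (a : Int) (d : Int) (r : Int) (n : Int) (hasil : Option (List Int)) : List Int :=
  baris_aritmetika_geometri_go a d r n (hasil.getD [])

-- ===== PORT B =====
-- Source B: loop i in range(1, n+1), appending a + (i-1)*d*p and updating the running power p.
def baris_aritmetika_geometri_alt (a : Int) (d : Int) (r : Int) (n : Int) (hasil : Option (List Int)) : List Int :=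
  ((PySem.List.pyRange 1 (n + 1) 1).foldl
    (fun (s : List Int × Int) i => (s.1 ++ [a + (i - 1) * d * s.2], s.2 * r)) (hasil.getD [], 1)).1

-- ===== PRECONDITION & SPEC =====
-- Pre_ excludes n ≤ 0, where the Python A never returns (infinite recursion → RecursionError).
def Pre_baris_aritmetika_geometri (a : Int) (d : Int) (r : Int) (n : Int) (hasil : Option (List Int)) : Prop := 1 ≤ n
instance (a : Int) (d : Int) (r : Int) (n : Int) (hasil : Option (List Int)) : Decidable (Pre_baris_aritmetika_geometri a d r n hasil) := by unfold Pre_baris_aritmetika_geometri; infer_instance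
def pvWitness_baris_aritmetika_geometri : Int × Int × Int × Int × Option (List Int) := (2, 3, 2, 4, none)

def Spec_baris_aritmetika_geometri (a : Int) (d : Int) (r : Int) (n : Int) (hasil : Option (List Int)) (out : List Int) : Prop := out = baris_aritmetika_geometri_alt a d r n hasil
instance (a : Int) (d : Int) (r : Int) (n : Int) (hasil : Option (List Int)) (out : List Int) : Decidable (Spec_baris_aritmetika_geometri a d r n hasil out) := by unfold Spec_baris_aritmetika_geometri; infer_instance

-- ===== CLAIM (what is proved, stated in full; the proofs are below) =====
def Claim_equal_baris_aritmetika_geometri : Prop := ∀ (a : Int) (d : Int) (r : Int) (n : Int) (hasil : Option (List Int)), Dom_baris_aritmetika_geometri a d r n hasil → Pre_baris_aritmetika_geometri a d r n hasil → Spec_baris_aritmetika_geometri a d r n hasil (baris_aritmetika_geometri a d r n hasil)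

-- ===== LEMMAS AND PROOFS =====

-- Invariant: B's fold over range(1, n+1) returns (A's result, r^n).
theorem pv_fold_eq (a d r : Int) (hasil : List Int) :
    ∀ (n : Int), 1 ≤ n →
      ((PySem.List.pyRange 1 (n + 1) 1).foldl
        (fun (s : List Int × Int) i => (s.1 ++ [a + (i - 1) * d * s.2], s.2 * r)) (hasil, 1))
      = (baris_aritmetika_geometri_go a d r n hasil, r ^ n.toNat) := by
  intro n hn
  induction hnat : n.toNat generalizing n with
  | zero => omega
  | succ k ih =>
    have hstep : PySem.List.pyRange 1 (n + 1) 1 = PySem.List.pyRange 1 n 1 ++ [n] :=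
      PySem.List.pyRange_one_succ_right (by omega)
    rw [hstep, List.foldl_append]
    by_cases h1 : n = 1
    · subst h1
      have hk0 : k = 0 := by omega
      subst hk0
      simp [PySem.List.pyRange, baris_aritmetika_geometri_go]
    · have hk1 : 1 ≤ n - 1 := by omega
      have hkn : (n - 1).toNat = k := by omega
      have hrw : PySem.List.pyRange 1 n 1 = PySem.List.pyRange 1 ((n - 1) + 1) 1 := by
        norm_num
      rw [hrw, ih (n - 1) hk1 hkn]
      simp only [List.foldl_cons, List.foldl_nil]
      have hpos : ¬ (n ≤ 0) := by omega
      conv_rhs => rw [baris_aritmetika_geometri_go]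
      simp only [h1, if_false, dif_neg hpos, hkn, pow_succ]

-- ===== VERDICT (by name: the statement is the Claim_ definition above) =====
theorem baris_aritmetika_geometri_spec : Claim_equal_baris_aritmetika_geometri := by
  intro a d r n hasil _ hpre
  unfold Spec_baris_aritmetika_geometri baris_aritmetika_geometri baris_aritmetika_geometri_alt
  rw [pv_fold_eq a d r (hasil.getD []) n hpre]
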